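-- pv_equiv track=rewrite | github.com/robertoSreis/AnyConnect | main.py | _inject_executable_block_head
-- ===== SOURCE A (Python) =====
-- def _inject_executable_block_head(gcode: str) -> str:
--     """
--     Injeta '; EXECUTABLE_BLOCK_HEAD' no gcode principal (plate_1.gcode) quando
--     ausente. O GoKlipper usa esse marcador no gcode para saber onde o setup
--     termina e onde começa a impressão real — sem ele, o skip de objetos não funciona.
--
--     Estratégia: injeta imediatamente antes da primeira linha que seja
--     EXCLUDE_OBJECT_START, ;LAYER_CHANGE ou ; FLUSH_START que apareça após
--     as linhas de DEFINEs/setup (ou seja, após M83 / G9111 / G90 / G21).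
--     Se nenhuma dessas âncoras for encontrada, não faz nada.
--     """
--     import re as _re
--
--     if "; EXECUTABLE_BLOCK_HEAD" in gcode:
--         return gcode  # já tem
--
--     if "; EXECUTABLE_BLOCK_START" not in gcode:
--         return gcode  # sem estrutura de bloco, não mexe
--
--     lines = gcode.splitlines(keepends=True)
--     result = []
--     in_exec = False
--     injected = False
--
--     # Âncoras que marcam "fim do setup / início da impressão real"
--     _anchors = (
--         "EXCLUDE_OBJECT_START",
--         ";LAYER_CHANGE",
--         "; FLUSH_START",
--     )
--
--     for line in lines:
--         ls = line.strip()
--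
--         if ls == "; EXECUTABLE_BLOCK_START":
--             in_exec = True
--             result.append(line)
--             continue
--
--         if in_exec and not injected:
--             if any(ls.startswith(a) for a in _anchors):
--                 result.append("; EXECUTABLE_BLOCK_HEAD\n")
--                 injected = True
--
--         result.append(line)
--
--     return "".join(result)
-- ===== SOURCE B (Python) =====
-- def _inject_executable_block_head(gcode: str) -> str:
--     """Locate-then-splice: find the block-start line, then the first anchor
--     line after it, and splice the HEAD marker in by slicing (no flag loop)."""
--     if "; EXECUTABLE_BLOCK_HEAD" in gcode:
--         return gcode
--     if "; EXECUTABLE_BLOCK_START" not in gcode: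
--         return gcode
--
--     lines = gcode.splitlines(keepends=True)
--     start = next((i for i, l in enumerate(lines)
--                   if l.strip() == "; EXECUTABLE_BLOCK_START"), None)
--     if start is None:
--         return gcode
--
--     anchors = ("EXCLUDE_OBJECT_START", ";LAYER_CHANGE", "; FLUSH_START")
--     for j in range(start + 1, len(lines)):
--         if lines[j].strip().startswith(anchors):
--             return "".join(lines[:j]) + "; EXECUTABLE_BLOCK_HEAD\n" + "".join(lines[j:])
--     return gcode
-- ===== Notes on version B (the rewrite author's own statement) =====
-- stated objective: simpler
-- what changed: A's single flag-carrying copy loop (in_exec/injected state, result.append per line) is replaced by a locate-then-splice decomposition: find the block-start line index, find the first anchor line after it, and splice the HEAD marker in with slices.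
import Mathlib
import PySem

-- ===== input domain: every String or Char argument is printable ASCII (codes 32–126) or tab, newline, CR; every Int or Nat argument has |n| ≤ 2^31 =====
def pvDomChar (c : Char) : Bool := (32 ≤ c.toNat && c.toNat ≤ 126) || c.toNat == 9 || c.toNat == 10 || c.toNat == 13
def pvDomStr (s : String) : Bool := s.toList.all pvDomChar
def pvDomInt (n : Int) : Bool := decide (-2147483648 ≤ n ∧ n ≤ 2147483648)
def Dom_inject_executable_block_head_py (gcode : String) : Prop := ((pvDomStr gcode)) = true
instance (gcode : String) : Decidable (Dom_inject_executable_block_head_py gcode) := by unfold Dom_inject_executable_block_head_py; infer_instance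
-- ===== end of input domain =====

-- B replaces A's flag-carrying copy loop by locate-then-splice (find block start,
-- find first anchor after it, splice by slicing); objective: simpler, same cost.

-- shared literals (both Pythons contain the same string constants)
def pvHeadStr : List Char := "; EXECUTABLE_BLOCK_HEAD".toList
def pvStartStr : List Char := "; EXECUTABLE_BLOCK_START".toList
def pvHeadLine : List Char := pvHeadStr ++ ['\n']
def pvAnchors : List (List Char) :=
  ["EXCLUDE_OBJECT_START".toList, ";LAYER_CHANGE".toList, "; FLUSH_START".toList]

-- str.splitlines(keepends=True), hand-ported (PySem has only the keepends=False form).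
-- Exact on Dom: the only line breaks a Dom string can contain are '\n', '\r' and '\r\n'
-- (Python's extra break characters \v, \f, \x1c-\x1e, \x85, … lie outside Dom).
def pvSplitlinesK (acc : List Char) : List Char → List (List Char)
  | [] => if acc = [] then [] else [acc]
  | '\r' :: '\n' :: rest => (acc ++ ['\r', '\n']) :: pvSplitlinesK [] rest
  | c :: rest =>
    if c = '\n' then (acc ++ ['\n']) :: pvSplitlinesK [] rest
    else if c = '\r' then (acc ++ ['\r']) :: pvSplitlinesK [] rest
    else pvSplitlinesK (acc ++ [c]) rest

-- ===== PORT A =====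
-- A's for-loop: state (result, in_exec, injected), one line at a time, result.append.
def injectLoopA (lines : List (List Char)) (result : List (List Char))
    (in_exec injected : Bool) : List (List Char) :=
  match lines with
  | [] => result
  | line :: rest =>
    let ls := PySem.Chars.strip line
    if ls == pvStartStr then
      injectLoopA rest (result ++ [line]) true injected
    else if in_exec && !injected && pvAnchors.any (fun a => PySem.Chars.startswith ls a) then
      injectLoopA rest (result ++ [pvHeadLine, line]) in_exec true
    else
      injectLoopA rest (result ++ [line]) in_exec injected

def inject_executable_block_head_py (gcode : String) : String :=
  if PySem.Str.isIn "; EXECUTABLE_BLOCK_HEAD" gcode then gcode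
  else if !PySem.Str.isIn "; EXECUTABLE_BLOCK_START" gcode then gcode
  else
    String.ofList (PySem.Chars.join []
      (injectLoopA (pvSplitlinesK [] gcode.toList) [] false false))

-- ===== PORT B =====
def inject_executable_block_head_py_alt (gcode : String) : String :=
  if PySem.Str.isIn "; EXECUTABLE_BLOCK_HEAD" gcode then gcode
  else if !PySem.Str.isIn "; EXECUTABLE_BLOCK_START" gcode then gcode
  else
    -- next((i for i, l in enumerate(lines) if l.strip() == START), None)
    match (pvSplitlinesK [] gcode.toList).findIdx?
        (fun l => PySem.Chars.strip l == pvStartStr) with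
    | none => gcode
    | some start =>
      -- first j in range(start+1, len(lines)) whose stripped line starts with an anchor
      match ((pvSplitlinesK [] gcode.toList).drop (start + 1)).findIdx?
          (fun l => pvAnchors.any (fun a => PySem.Chars.startswith (PySem.Chars.strip l) a)) with
      | none => gcode
      | some t =>
        String.ofList (PySem.Chars.join [] ((pvSplitlinesK [] gcode.toList).take (start + 1 + t))
          ++ pvHeadLine
          ++ PySem.Chars.join [] ((pvSplitlinesK [] gcode.toList).drop (start + 1 + t)))

-- ===== PRECONDITION & SPEC =====
def Spec_inject_executable_block_head_py (gcode : String) (out : String) : Prop := out = inject_executable_block_head_py_alt gcode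
instance (gcode : String) (out : String) : Decidable (Spec_inject_executable_block_head_py gcode out) := by unfold Spec_inject_executable_block_head_py; infer_instance

-- ===== CLAIM (what is proved, stated in full; the proofs are below) =====
def Claim_equal_inject_executable_block_head_py : Prop := ∀ (gcode : String), Dom_inject_executable_block_head_py gcode → Spec_inject_executable_block_head_py gcode (inject_executable_block_head_py gcode)

-- ===== LEMMAS AND PROOFS =====

-- abbreviations for the two line predicates
def pvP (l : List Char) : Bool := PySem.Chars.strip l == pvStartStr
def pvQ (l : List Char) : Bool :=
  pvAnchors.any (fun a => PySem.Chars.startswith (PySem.Chars.strip l) a)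

theorem pvQ_of_pvP {l : List Char} (h : pvP l = true) : pvQ l = false := by
  have he : PySem.Chars.strip l = pvStartStr := by
    simpa [pvP] using h
  simp [pvQ, he]
  decide

theorem pv_join_eq_flatten (ls : List (List Char)) :
    PySem.Chars.join [] ls = ls.flatten := by
  induction ls with
  | nil => decide
  | cons a t ih =>
    cases t with
    | nil => simp [PySem.Chars.join_singleton]
    | cons b r => rw [PySem.Chars.join_cons_cons, ih]; simp
theorem pv_splitlinesK_flatten (cs : List Char) (acc : List Char) :
    (pvSplitlinesK acc cs).flatten = acc ++ cs := by
  induction acc, cs using pvSplitlinesK.induct <;>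
    simp_all [pvSplitlinesK]

-- injected = true: the loop only copies
theorem pv_loopA_injected (ls : List (List Char)) (res : List (List Char)) (ie : Bool) :
    injectLoopA ls res ie true = res ++ ls := by
  induction ls generalizing res ie with
  | nil => simp [injectLoopA]
  | cons l t ih =>
    by_cases h : pvP l = true <;>
      simp [injectLoopA, pvP] at h ⊢ <;> simp [h, ih]

-- in_exec = true, injected = false: copy until the first anchor line, splice head there
theorem pv_loopA_exec (ls : List (List Char)) (res : List (List Char)) :
    injectLoopA ls res true false =
      res ++ (match ls.findIdx? pvQ with
              | none => ls
              | some j => ls.take j ++ [pvHeadLine] ++ ls.drop j) := by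
  induction ls generalizing res with
  | nil => simp [injectLoopA]
  | cons l t ih =>
    by_cases hq : pvQ l = true
    · have hp : pvP l = false := by
        by_contra hc
        have := pvQ_of_pvP (l := l) (by revert hc; cases pvP l <;> simp)
        simp [this] at hq
      rw [injectLoopA]
      simp only [pvP] at hp
      simp only [hp]
      simp only [pvQ] at hq
      simp only [Bool.true_and, Bool.not_false, hq, if_true, if_false, Bool.false_eq_true]
      rw [pv_loopA_injected]
      simp [List.findIdx?_cons, pvQ, hq]
    · rw [injectLoopA]
      by_cases hp : pvP l = true
      · simp only [pvP] at hp
        simp only [hp, if_true]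
        rw [ih]
        have hq' : pvQ l = false := by revert hq; cases pvQ l <;> simp
        simp [List.findIdx?_cons, hq']
        cases t.findIdx? pvQ <;> simp
      · simp only [pvP] at hp
        simp only [hp, Bool.false_eq_true, if_false]
        have hq' : pvQ l = false := by revert hq; cases pvQ l <;> simp
        simp only [pvQ] at hq'
        simp only [hq', Bool.and_false, Bool.false_eq_true, if_false]
        rw [ih]
        simp [List.findIdx?_cons, pvQ, hq']
        cases t.findIdx? pvQ <;> simp

-- the main loop characterisation: A's fold equals B's locate-then-splice, on any lines
theorem pv_loopA_main (ls : List (List Char)) (res : List (List Char)) :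
    injectLoopA ls res false false =
      res ++ (match ls.findIdx? pvP with
              | none => ls
              | some i =>
                match (ls.drop (i + 1)).findIdx? pvQ with
                | none => ls
                | some t => ls.take (i + 1 + t) ++ [pvHeadLine] ++ ls.drop (i + 1 + t)) := by
  induction ls generalizing res with
  | nil => simp [injectLoopA]
  | cons l t ih =>
    rw [injectLoopA]
    by_cases hp : pvP l = true
    · simp only [pvP] at hp
      simp only [hp, if_true]
      rw [pv_loopA_exec]
      have hp' : pvP l = true := by simpa [pvP] using hp
      simp [List.findIdx?_cons, hp']
      cases h : t.findIdx? pvQ <;> simp [Nat.add_comm]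
    · simp only [pvP] at hp
      simp only [hp, Bool.false_eq_true, if_false, Bool.false_and]
      rw [ih]
      have hp' : pvP l = false := by simpa [pvP] using hp
      simp [List.findIdx?_cons, hp']
      cases h : t.findIdx? pvP with
      | none => simp
      | some i =>
        simp
        cases h2 : (t.drop (i + 1)).findIdx? pvQ with
        | none => simp
        | some v =>
          simp
          rw [show i + 1 + 1 + v = i + 1 + v + 1 from by omega]
          simp

-- ===== VERDICT (by name: the statement is the Claim_ definition above) =====
theorem inject_executable_block_head_py_spec : Claim_equal_inject_executable_block_head_py := by
  intro gcode _
  unfold Spec_inject_executable_block_head_py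
  unfold inject_executable_block_head_py inject_executable_block_head_py_alt
  by_cases h1 : PySem.Str.isIn "; EXECUTABLE_BLOCK_HEAD" gcode = true
  · rw [if_pos h1, if_pos h1]
  · rw [if_neg h1, if_neg h1]
    by_cases h2 : PySem.Str.isIn "; EXECUTABLE_BLOCK_START" gcode = true
    · rw [if_neg (by simpa using h2), if_neg (by simpa using h2)]
      rw [pv_loopA_main]
      rw [show (fun l => PySem.Chars.strip l == pvStartStr) = pvP from rfl]
      rw [show (fun l => pvAnchors.any fun a => PySem.Chars.startswith (PySem.Chars.strip l) a) = pvQ from rfl]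
      have hflat : (pvSplitlinesK [] gcode.toList).flatten = gcode.toList := by
        simpa using pv_splitlinesK_flatten gcode.toList []
      cases hi : (pvSplitlinesK [] gcode.toList).findIdx? pvP with
      | none =>
        simp only [hi, List.nil_append, pv_join_eq_flatten, hflat, String.ofList_toList]
      | some i =>
        simp only [hi]
        cases ht : ((pvSplitlinesK [] gcode.toList).drop (i + 1)).findIdx? pvQ with
        | none =>
          simp only [ht, List.nil_append, pv_join_eq_flatten, hflat, String.ofList_toList]
        | some t =>
          simp only [ht, List.nil_append, pv_join_eq_flatten, List.flatten_append,
            List.flatten_cons, List.flatten_nil, String.ofList_append]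
          simp
    · rw [if_pos (by simpa using h2), if_pos (by simpa using h2)]
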